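-- pv_equiv track=rewrite | github.com/gururajemail11-lab/Stealth-Project---Server-for-Vercel | alerts.py | filter_matching_jobs
-- ===== SOURCE A (Python) =====
-- def filter_matching_jobs(jobs: list[dict], keywords: list[str]) -> list[dict]:
--     """Return jobs whose title/description matches any alert keyword."""
--     kws = [k.lower() for k in keywords]
--     matched = []
--     for job in jobs:
--         text = (
--             f"{job.get('job_title','')} {job.get('job_description','')} "
--             f"{job.get('company_name','')} {job.get('required_skills','')}"
--         ).lower()
--         if any(kw in text for kw in kws):
--             matched.append(job)
--     return matched
-- ===== SOURCE B (Python) =====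
-- def filter_matching_jobs(jobs: list[dict], keywords: list[str]) -> list[dict]:
--     """Return jobs whose title/description matches any alert keyword.
--
--     Keyword-major strategy: precompute each job's searchable text once, then
--     sweep keyword by keyword over all texts, accumulating a hit mask; finally
--     keep the jobs whose mask bit is set.
--     """
--     texts = [
--         ' '.join((job.get('job_title', ''), job.get('job_description', ''),
--                   job.get('company_name', ''), job.get('required_skills', ''))).lower()
--         for job in jobs
--     ]
--     hit = [False] * len(jobs)
--     for kw in keywords:
--         k = kw.lower()
--         hit = [h or (k in t) for h, t in zip(hit, texts)]
--     return [job for job, h in zip(jobs, hit) if h]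
-- ===== Notes on version B (the rewrite author's own statement) =====
-- stated objective: alternative
-- what changed: A loops job-by-job and tests every keyword inside the loop; B precomputes all searchable texts, then sweeps keyword-by-keyword accumulating a boolean hit mask over all jobs, and finally filters jobs by the mask.
import Mathlib
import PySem

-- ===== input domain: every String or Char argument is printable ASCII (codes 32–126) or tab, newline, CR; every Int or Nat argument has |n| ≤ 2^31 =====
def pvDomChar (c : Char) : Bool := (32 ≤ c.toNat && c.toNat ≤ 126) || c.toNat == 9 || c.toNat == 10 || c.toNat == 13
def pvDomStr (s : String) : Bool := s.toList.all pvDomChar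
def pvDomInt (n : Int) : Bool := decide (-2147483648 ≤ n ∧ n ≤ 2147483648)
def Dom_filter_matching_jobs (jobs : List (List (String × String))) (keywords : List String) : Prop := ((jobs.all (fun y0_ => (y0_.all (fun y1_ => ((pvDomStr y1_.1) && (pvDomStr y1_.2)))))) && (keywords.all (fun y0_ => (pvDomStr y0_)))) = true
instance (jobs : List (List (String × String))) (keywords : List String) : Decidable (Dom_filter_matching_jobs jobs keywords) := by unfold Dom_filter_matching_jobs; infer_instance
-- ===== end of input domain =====

-- B replaces A's job-major loop (test every keyword inside each job's iteration) by a
-- keyword-major sweep over a precomputed hit mask; objective: alternative (same cost).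

-- ===== PORT A =====
-- text = f"{job.get('job_title','')} {job.get('job_description','')} {job.get('company_name','')} {job.get('required_skills','')}".lower()
def pvTextA (job : List (String × String)) : String :=
  PySem.Str.lower (PySem.Str.join " "
    [PySem.Dict.getD ⟨job⟩ "job_title" "", PySem.Dict.getD ⟨job⟩ "job_description" "",
     PySem.Dict.getD ⟨job⟩ "company_name" "", PySem.Dict.getD ⟨job⟩ "required_skills" ""])

def filter_matching_jobs (jobs : List (List (String × String))) (keywords : List String) : List (List (String × String)) :=
  let kws := keywords.map PySem.Str.lower
  jobs.foldl (fun matched job =>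
    if kws.any (fun kw => PySem.Str.isIn kw (pvTextA job)) then matched ++ [job] else matched) []

-- ===== PORT B =====
-- text of one job: ' '.join((get…, get…, get…, get…)).lower()
def pvTextB (job : List (String × String)) : String :=
  PySem.Str.lower (PySem.Str.join " "
    [PySem.Dict.getD ⟨job⟩ "job_title" "", PySem.Dict.getD ⟨job⟩ "job_description" "",
     PySem.Dict.getD ⟨job⟩ "company_name" "", PySem.Dict.getD ⟨job⟩ "required_skills" ""])

def filter_matching_jobs_alt (jobs : List (List (String × String))) (keywords : List String) : List (List (String × String)) :=
  let texts := jobs.map pvTextB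
  let hit := keywords.foldl
    (fun hit kw => (hit.zip texts).map (fun ht => ht.1 || PySem.Str.isIn (PySem.Str.lower kw) ht.2))
    (List.replicate jobs.length false)
  (jobs.zip hit).filterMap (fun jh => if jh.2 then some jh.1 else none)

-- ===== PRECONDITION & SPEC =====
def Spec_filter_matching_jobs (jobs : List (List (String × String))) (keywords : List String) (out : List (List (String × String))) : Prop := out = filter_matching_jobs_alt jobs keywords
instance (jobs : List (List (String × String))) (keywords : List String) (out : List (List (String × String))) : Decidable (Spec_filter_matching_jobs jobs keywords out) := by unfold Spec_filter_matching_jobs; infer_instance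

-- ===== CLAIM (what is proved, stated in full; the proofs are below) =====
def Claim_equal_filter_matching_jobs : Prop := ∀ (jobs : List (List (String × String))) (keywords : List String), Dom_filter_matching_jobs jobs keywords → Spec_filter_matching_jobs jobs keywords (filter_matching_jobs jobs keywords)

-- ===== LEMMAS AND PROOFS =====

-- (l₁.zip l₂).map (fun p => f p.1 p.2) = zipWith f l₁ l₂
theorem pv_zip_map {α β γ : Type} (f : α → β → γ) (l₁ : List α) (l₂ : List β) :
    (l₁.zip l₂).map (fun p => f p.1 p.2) = List.zipWith f l₁ l₂ := by
  induction l₁ generalizing l₂ with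
  | nil => simp
  | cons x xs ih => cases l₂ <;> simp [ih]

theorem pv_zipWith_id_right {α β : Type} (f : α → β → α) (h : ∀ a b, f a b = a)
    (l₁ : List α) (l₂ : List β) (hlen : l₁.length ≤ l₂.length) :
    List.zipWith f l₁ l₂ = l₁ := by
  induction l₁ generalizing l₂ with
  | nil => simp
  | cons x xs ih => cases l₂ with
    | nil => simp at hlen
    | cons y ys => simp only [List.zipWith, h]; simp only [List.length_cons, Nat.add_le_add_iff_right] at hlen; rw [ih ys hlen]

theorem pv_zipWith_zipWith {α β γ δ : Type} (f : γ → β → δ) (g : α → β → γ)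
    (l₁ : List α) (l₂ : List β) :
    List.zipWith f (List.zipWith g l₁ l₂) l₂ = List.zipWith (fun a b => f (g a b) b) l₁ l₂ := by
  induction l₁ generalizing l₂ with
  | nil => simp
  | cons x xs ih => cases l₂ <;> simp [ih]

-- the keyword-major fold computes, pointwise, the disjunction over all keywords
theorem pv_fold_mask {β : Type} (q : String → β → Bool) (kws : List String)
    (init : List Bool) (texts : List β) (hlen : init.length ≤ texts.length) :
    kws.foldl (fun h kw => (h.zip texts).map (fun ht => ht.1 || q kw ht.2)) init
      = List.zipWith (fun hb t => hb || kws.any (fun kw => q kw t)) init texts := by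
  induction kws generalizing init with
  | nil =>
      rw [List.foldl_nil]
      exact (pv_zipWith_id_right _ (by simp) init texts hlen).symm
  | cons kw kws ih =>
      rw [List.foldl_cons, pv_zip_map (fun a b => a || q kw b),
          ih _ (by simp [List.length_zipWith]), pv_zipWith_zipWith]
      have hfun : (fun (a : Bool) (b : β) => (a || q kw b) || kws.any (fun k => q k b))
          = (fun (a : Bool) (b : β) => a || (kw :: kws).any (fun k => q k b)) := by
        funext a b; simp [Bool.or_assoc]
      rw [hfun]

theorem pv_zipWith_replicate {α β : Type} (f : α → β → α) (c : α) (l : List β) :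
    List.zipWith f (List.replicate l.length c) l = l.map (f c) := by
  induction l with
  | nil => rfl
  | cons x xs ih => simp [List.replicate_succ, ih]

theorem pv_filterMap_zip_map {α : Type} (g : α → Bool) (l : List α) :
    (l.zip (l.map g)).filterMap (fun jh => if jh.2 then some jh.1 else none) = l.filter g := by
  induction l with
  | nil => rfl
  | cons x xs ih => by_cases h : g x <;> simp [h, ih]

-- ===== VERDICT (by name: the statement is the Claim_ definition above) =====
set_option maxHeartbeats 1000000 in
theorem filter_matching_jobs_spec : Claim_equal_filter_matching_jobs := by
  intro jobs keywords _
  show filter_matching_jobs jobs keywords = filter_matching_jobs_alt jobs keywords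
  unfold filter_matching_jobs filter_matching_jobs_alt
  simp only [PySem.List.foldl_append_if_eq_filter, List.nil_append]
  rw [show jobs.length = (jobs.map pvTextB).length by simp,
      pv_fold_mask (fun kw t => PySem.Str.isIn (PySem.Str.lower kw) t) keywords _ _ (by simp),
      pv_zipWith_replicate, List.map_map]
  rw [pv_filterMap_zip_map]
  congr 1; funext job
  simp only [List.any_map]
  exact congrArg (List.any keywords)
    (funext fun kw => by simp [Function.comp, pvTextA, pvTextB, PySem.Str.toList_lower])
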